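-- pv_equiv track=rewrite | github.com/eazycxmp/gtm-ai-revenue-systems | vortex-scraper/scripts/rx_union_contacts.py | text_after_label
-- ===== SOURCE A (Python) =====
-- def text_after_label(label, text):
--     lines = text.splitlines()
--     for i, line in enumerate(lines):
--         if label.lower() in line.lower():
--             for j in range(i+1, min(i+5, len(lines))):
--                 v = lines[j].strip()
--                 if v: return v
--     return ""
-- ===== SOURCE B (Python) =====
-- def text_after_label(label, text):
--     # single linear pass with a countdown "remaining eligible lines" window
--     lab = label.lower()
--     remaining = 0
--     for line in text.splitlines():
--         if remaining > 0:
--             v = line.strip()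
--             if v:
--                 return v
--             remaining -= 1
--         if lab in line.lower():
--             remaining = 4
--     return ""
-- ===== Notes on version B (the rewrite author's own statement) =====
-- stated objective: simpler
-- what changed: Replaces A's nested loops (outer scan for label lines plus an index-based inner look-ahead of up to 4 lines) with a single linear pass over the lines carrying a countdown of still-eligible lines, lowering the label once up front.
import Mathlib
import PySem

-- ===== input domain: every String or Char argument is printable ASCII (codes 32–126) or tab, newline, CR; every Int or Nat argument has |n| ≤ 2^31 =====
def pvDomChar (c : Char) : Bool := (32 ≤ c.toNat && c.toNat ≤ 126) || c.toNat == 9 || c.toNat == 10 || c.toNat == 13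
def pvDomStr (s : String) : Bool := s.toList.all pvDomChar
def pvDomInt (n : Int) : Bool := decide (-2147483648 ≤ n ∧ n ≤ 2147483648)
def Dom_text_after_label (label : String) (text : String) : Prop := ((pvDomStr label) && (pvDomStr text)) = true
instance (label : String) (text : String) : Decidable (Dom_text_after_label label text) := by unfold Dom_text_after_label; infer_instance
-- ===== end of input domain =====

-- B replaces A's nested loops (outer match scan + bounded inner look-ahead re-indexing the list)
-- by one linear pass carrying a countdown of still-eligible lines (objective: simpler decomposition).

-- ===== PORT A =====
-- inner loop: for j in range(i+1, min(i+5, len(lines))): v = lines[j].strip(); if v: return v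
-- (the index j is always in range, so the pyGetD default "" is never used)
def pvInnerA (lines : List String) : List Int → Option String
  | [] => none
  | j :: js =>
      let v := PySem.Str.strip (PySem.List.pyGetD lines j "")
      if v ≠ "" then some v else pvInnerA lines js

-- outer loop: for i, line in enumerate(lines): if label.lower() in line.lower(): …
def pvOuterA (label : String) (lines : List String) : List (Int × String) → String
  | [] => ""
  | (i, line) :: rest =>
      if PySem.Str.isIn (PySem.Str.lower label) (PySem.Str.lower line) then
        match pvInnerA lines (PySem.List.pyRange (i+1) (min (i+5) (PySem.List.len lines)) 1) with
        | some v => v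
        | none => pvOuterA label lines rest
      else pvOuterA label lines rest

def text_after_label (label : String) (text : String) : String :=
  let lines := PySem.Str.splitlines text
  pvOuterA label lines (PySem.List.enumerate lines)

-- ===== PORT B =====
-- single pass with countdown `remaining` (a count of lines still inside some label's window)
def pvGoB (lab : String) : List String → Nat → String
  | [], _ => ""
  | line :: rest, remaining =>
      if remaining > 0 then
        let v := PySem.Str.strip line
        if v ≠ "" then v
        else pvGoB lab rest (if PySem.Str.isIn lab (PySem.Str.lower line) then 4 else remaining - 1)
      else pvGoB lab rest (if PySem.Str.isIn lab (PySem.Str.lower line) then 4 else remaining)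

def text_after_label_alt (label : String) (text : String) : String :=
  pvGoB (PySem.Str.lower label) (PySem.Str.splitlines text) 0

-- ===== PRECONDITION & SPEC =====
def Spec_text_after_label (label : String) (text : String) (out : String) : Prop := out = text_after_label_alt label text
instance (label : String) (text : String) (out : String) : Decidable (Spec_text_after_label label text out) := by unfold Spec_text_after_label; infer_instance

-- ===== CLAIM (what is proved, stated in full; the proofs are below) =====
def Claim_equal_text_after_label : Prop := ∀ (label : String) (text : String), Dom_text_after_label label text → Spec_text_after_label label text (text_after_label label text)

-- ===== LEMMAS AND PROOFS =====

-- first non-empty stripped line of a list, if any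
def pvFirstNE (xs : List String) : Option String :=
  (xs.find? (fun l => PySem.Str.strip l != "")).map PySem.Str.strip

-- A's algorithm, rephrased structurally on suffixes (bridge between the two ports)
def pvFA (lab : String) : List String → String
  | [] => ""
  | l :: ls =>
      if PySem.Str.isIn lab (PySem.Str.lower l) then
        match pvFirstNE (ls.take 4) with
        | some v => v
        | none => pvFA lab ls
      else pvFA lab ls

theorem pvInnerA_eq (lines : List String) (a t : Nat) (h : a + t ≤ lines.length) :
    pvInnerA lines (PySem.List.pyRange a (a + t) 1) = pvFirstNE ((lines.drop a).take t) := by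
  induction t generalizing a with
  | zero =>
      rw [PySem.List.pyRange_one_eq_nil (by push_cast; omega)]
      simp [pvInnerA, pvFirstNE]
  | succ t ih =>
      have ha : a < lines.length := by omega
      rw [PySem.List.pyRange_one_cons (by push_cast; omega)]
      rw [show (PySem.List.pyRange ((a:Int)+1) ((a:Int) + ((t+1 : Nat) : Int)) 1)
            = PySem.List.pyRange ((a+1 : Nat) : Int) (((a+1 : Nat) : Int) + (t : Nat)) 1 by
          push_cast; ring_nf]
      rw [List.drop_eq_getElem_cons ha, List.take_succ_cons]
      show (if PySem.Str.strip (PySem.List.pyGetD lines (a : Int) "") ≠ "" then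
              some (PySem.Str.strip (PySem.List.pyGetD lines (a : Int) ""))
            else pvInnerA lines (PySem.List.pyRange ((a+1 : Nat) : Int) (((a+1 : Nat) : Int) + (t : Nat)) 1)) = _
      have hget : PySem.List.pyGetD lines (a : Int) "" = lines[a] := by
        rw [PySem.List.pyGetD_natCast]
        simp [List.getD, ha]
      rw [hget]
      by_cases hne : PySem.Str.strip lines[a] ≠ ""
      · rw [if_pos hne]
        simp [pvFirstNE, hne]
      · rw [if_neg hne]
        have heq : PySem.Str.strip lines[a] = "" := by push Not at hne; exact hne
        rw [ih (a + 1) (by omega)]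
        simp [pvFirstNE, heq]

theorem pvOuterA_eq (label : String) (lines : List String) :
    ∀ (suf : List String) (k : Nat), suf = lines.drop k →
      pvOuterA label lines (PySem.List.enumerate suf (k : Int)) = pvFA (PySem.Str.lower label) suf := by
  intro suf
  induction suf with
  | nil => intro k _; simp [PySem.List.enumerate, pvOuterA, pvFA]
  | cons l rest ih =>
      intro k hk
      have hk1 : rest = lines.drop (k + 1) := by
        have := congrArg List.tail hk
        simpa [List.tail_drop] using this
      have hklen : k < lines.length := by
        by_contra hle
        rw [List.drop_eq_nil_of_le (by omega)] at hk
        cases hk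
      have hrlen : rest.length = lines.length - (k + 1) := by
        rw [hk1, List.length_drop]
      rw [PySem.List.enumerate_cons]
      show (if PySem.Str.isIn (PySem.Str.lower label) (PySem.Str.lower l) then
              match pvInnerA lines (PySem.List.pyRange ((k : Int) + 1) (min ((k : Int) + 5) (PySem.List.len lines)) 1) with
              | some v => v
              | none => pvOuterA label lines (PySem.List.enumerate rest ((k : Int) + 1))
            else pvOuterA label lines (PySem.List.enumerate rest ((k : Int) + 1))) = _
      have hcast1 : ((k : Int) + 1) = ((k + 1 : Nat) : Int) := by push_cast; ring
      have hinner : pvInnerA lines (PySem.List.pyRange ((k : Int) + 1) (min ((k : Int) + 5) (PySem.List.len lines)) 1)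
          = pvFirstNE (rest.take 4) := by
        have harg : min ((k : Int) + 5) (PySem.List.len lines)
            = ((k + 1 : Nat) : Int) + ((min 4 (lines.length - (k + 1)) : Nat) : Int) := by
          rw [PySem.List.len_eq]
          push_cast
          omega
        rw [hcast1, harg, pvInnerA_eq lines (k + 1) (min 4 (lines.length - (k + 1))) (by omega), ← hk1]
        congr 1
        rw [show min 4 (lines.length - (k + 1)) = min 4 rest.length by omega]
        rw [← List.take_take, List.take_length]
      have hrec : pvOuterA label lines (PySem.List.enumerate rest ((k : Int) + 1))
          = pvFA (PySem.Str.lower label) rest := by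
        rw [hcast1]
        exact ih (k + 1) hk1
      rw [hinner, hrec]
      by_cases hm : PySem.Str.isIn (PySem.Str.lower label) (PySem.Str.lower l)
      · rw [if_pos hm]
        simp only [pvFA, if_pos hm]
      · rw [if_neg hm]
        simp only [pvFA, if_neg hm]

theorem pvFirstNE_take_mono (xs : List String) (a b : Nat) (hab : a ≤ b) (v : String)
    (h : pvFirstNE (xs.take a) = some v) : pvFirstNE (xs.take b) = some v := by
  unfold pvFirstNE at *
  have : xs.take a = (xs.take b).take a := by rw [List.take_take, min_eq_left hab]
  rw [this] at h
  obtain ⟨w, hw, hv⟩ : ∃ w, ((xs.take b).take a).find? (fun l => PySem.Str.strip l != "") = some w ∧ PySem.Str.strip w = v := by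
    cases hf : ((xs.take b).take a).find? (fun l => PySem.Str.strip l != "") with
    | none => rw [hf] at h; simp at h
    | some w => rw [hf] at h; exact ⟨w, rfl, by simpa using h⟩
  have : (xs.take b).find? (fun l => PySem.Str.strip l != "") = some w := by
    have hsplit := (List.take_append_drop a (xs.take b)).symm
    rw [hsplit, List.find?_append, hw]
    rfl
  rw [this, Option.map_some, hv]

theorem pvGoB_eq (lab : String) :
    ∀ (ls : List String) (r : Nat), r ≤ 4 →
      pvGoB lab ls r = match pvFirstNE (ls.take r) with
        | some v => v
        | none => pvFA lab ls := by
  intro ls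
  induction ls with
  | nil => intro r _; simp [pvGoB, pvFirstNE, pvFA]
  | cons l ls ih =>
      intro r hr
      match r with
      | 0 =>
          have h0 : pvGoB lab (l :: ls) 0
              = if PySem.Str.isIn lab (PySem.Str.lower l) then pvGoB lab ls 4 else pvGoB lab ls 0 := by
            show (pvGoB lab ls (if PySem.Str.isIn lab (PySem.Str.lower l) then 4 else 0)) = _
            split <;> rfl
          rw [h0]
          by_cases hm : PySem.Str.isIn lab (PySem.Str.lower l)
          · rw [if_pos hm, ih 4 (by omega)]
            simp only [List.take_zero, pvFirstNE, List.find?_nil, Option.map_none, pvFA, if_pos hm]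
          · rw [if_neg hm, ih 0 (by omega)]
            simp only [List.take_zero, pvFirstNE, List.find?_nil, Option.map_none, pvFA, if_neg hm]
      | r' + 1 =>
          have h1 : pvGoB lab (l :: ls) (r' + 1)
              = if PySem.Str.strip l ≠ "" then PySem.Str.strip l
                else pvGoB lab ls (if PySem.Str.isIn lab (PySem.Str.lower l) then 4 else r') := by
            show (if 0 < r' + 1 then _ else _) = _
            rw [if_pos (Nat.succ_pos r')]
            rfl
          rw [h1]
          by_cases hne : PySem.Str.strip l ≠ ""
          · rw [if_pos hne]
            simp [pvFirstNE, hne]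
          · have heq : PySem.Str.strip l = "" := by push Not at hne; exact hne
            rw [if_neg hne]
            have htake : pvFirstNE ((l :: ls).take (r' + 1)) = pvFirstNE (ls.take r') := by
              simp [pvFirstNE, heq]
            rw [htake]
            by_cases hm : PySem.Str.isIn lab (PySem.Str.lower l)
            · rw [if_pos hm, ih 4 (by omega)]
              have hfa : pvFA lab (l :: ls) = match pvFirstNE (ls.take 4) with
                  | some v => v | none => pvFA lab ls := by
                simp only [pvFA, if_pos hm]
              cases h4 : pvFirstNE (ls.take 4) with
              | some v =>
                  cases hr' : pvFirstNE (ls.take r') with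
                  | some w =>
                      have := pvFirstNE_take_mono ls r' 4 (by omega) w hr'
                      rw [this] at h4
                      simp_all
                  | none => simp [hfa, h4]
              | none =>
                  cases hr' : pvFirstNE (ls.take r') with
                  | some w =>
                      have := pvFirstNE_take_mono ls r' 4 (by omega) w hr'
                      rw [this] at h4; cases h4
                  | none => simp [hfa, h4]
            · rw [if_neg hm, ih r' (by omega)]
              have hfa : pvFA lab (l :: ls) = pvFA lab ls := by simp only [pvFA, if_neg hm]
              rw [hfa]

-- ===== VERDICT (by name: the statement is the Claim_ definition above) =====
theorem text_after_label_spec : Claim_equal_text_after_label := by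
  intro label text _
  show _ = _
  unfold text_after_label text_after_label_alt
  have h := pvOuterA_eq label (PySem.Str.splitlines text) (PySem.Str.splitlines text) 0 (by simp)
  simp only [Nat.cast_zero] at h
  show pvOuterA label _ (PySem.List.enumerate _ 0) = _
  rw [h, pvGoB_eq _ _ 0 (by norm_num)]
  rfl
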